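-- pv_equiv track=rewrite | github.com/mshenfield/phrases | phrases.py | generate_phrases
-- ===== SOURCE A (Python) =====
-- def generate_phrases(sentence):
--     '''
--     Generate every sub-phrase of a sentence.
--
--     Take every possible ordered subset of words from the sentence. For example
--     >>> list(generate_phrases("The quick brown fox"))
--     [
--         "The",
--         "The quick",
--         "The quick brown",
--         "The quick brown fox",
--         "quick",
--         "quick brown",
--         "quick brown fox",
--         "brown",
--         "brown fox",
--         "fox"
--     ]
--
--     Yields
--     -------
--     str
--         The next phrase from the sentence
--     '''
--     phrase_frontier = []
--     # For each word, fist yield the word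
--     # Then append it to each phrase in the "phrase frontier" and yield a phrase
--     for word in sentence.split():
--         yield word
--         for ix, _ in enumerate(phrase_frontier):
--             phrase_frontier[ix] += " " + word
--             yield phrase_frontier[ix]
--         phrase_frontier.append(word)
-- ===== SOURCE B (Python) =====
-- def generate_phrases(sentence):
--     '''Yield every contiguous sub-phrase of a sentence, statelessly by slicing.'''
--     words = sentence.split()
--     for j in range(len(words)):
--         yield words[j]
--         for i in range(j):
--             yield ' '.join(words[i:j + 1])
-- ===== Notes on version B (the rewrite author's own statement) =====
-- stated objective: simpler
-- what changed: Drops the mutable phrase_frontier accumulator: B splits once and recomputes each phrase statelessly as a space-join of the slice words[i:j+1] over index pairs, instead of maintaining and mutating a growing list of partial phrases.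
import Mathlib
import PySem

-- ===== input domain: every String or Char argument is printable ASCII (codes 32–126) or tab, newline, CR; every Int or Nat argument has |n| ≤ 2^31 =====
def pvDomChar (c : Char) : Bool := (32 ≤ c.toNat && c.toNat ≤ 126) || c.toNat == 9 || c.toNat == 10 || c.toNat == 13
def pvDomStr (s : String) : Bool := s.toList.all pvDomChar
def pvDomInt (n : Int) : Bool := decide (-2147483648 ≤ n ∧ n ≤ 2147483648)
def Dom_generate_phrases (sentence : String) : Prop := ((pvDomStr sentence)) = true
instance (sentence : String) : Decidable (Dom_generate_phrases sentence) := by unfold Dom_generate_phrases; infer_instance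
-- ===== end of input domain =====

-- B drops A's mutable frontier of partial phrases and recomputes each phrase
-- statelessly as a space-join of the slice words[i:j+1]; same output order, objective: simpler.

-- ===== PORT A =====
-- state: (phrase_frontier, yielded output so far)
def generate_phrases (sentence : String) : List String :=
  ((PySem.Str.split₀ sentence).foldl
    (fun (st : List String × List String) word =>
      -- yield word
      let out := st.2 ++ [word]
      -- for ix, _ in enumerate(phrase_frontier): phrase_frontier[ix] += " " + word; yield it
      let inner := st.1.foldl
        (fun (acc : List String × List String) p =>
          let p' := p ++ " " ++ word
          (acc.1 ++ [p'], acc.2 ++ [p']))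
        ([], out)
      -- phrase_frontier.append(word)
      (inner.1 ++ [word], inner.2))
    ([], [])).2

-- ===== PORT B =====
def generate_phrases_alt (sentence : String) : List String :=
  let words := PySem.Str.split₀ sentence
  (List.range words.length).flatMap (fun j =>
    words.getD j "" ::
      (List.range j).map (fun (i : Nat) =>
        PySem.Str.join " " (PySem.List.slice words (some (i : Int)) (some ((j : Int) + 1)))))

-- ===== PRECONDITION & SPEC =====
def Spec_generate_phrases (sentence : String) (out : List String) : Prop := out = generate_phrases_alt sentence
instance (sentence : String) (out : List String) : Decidable (Spec_generate_phrases sentence out) := by unfold Spec_generate_phrases; infer_instance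

-- ===== CLAIM (what is proved, stated in full; the proofs are below) =====
def Claim_equal_generate_phrases : Prop := ∀ (sentence : String), Dom_generate_phrases sentence → Spec_generate_phrases sentence (generate_phrases sentence)

-- ===== LEMMAS AND PROOFS =====

-- ' '.join at the String level
def sjoin (l : List String) : String := PySem.Str.join " " l

theorem string_toList_inj {a b : String} (h : a.toList = b.toList) : a = b :=
  String.toList_injective h

theorem sjoin_singleton (w : String) : sjoin [w] = w := by
  apply string_toList_inj
  simp [sjoin, PySem.Str.toList_join, PySem.Chars.join_singleton]

theorem chars_join_append_singleton (sep w : List Char) (l : List (List Char)) (h : l ≠ []) :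
    PySem.Chars.join sep (l ++ [w]) = PySem.Chars.join sep l ++ sep ++ w := by
  induction l with
  | nil => exact absurd rfl h
  | cons a t ih =>
    cases t with
    | nil => simp [PySem.Chars.join_cons_cons, PySem.Chars.join_singleton]
    | cons b r =>
      have : ((b :: r) : List (List Char)) ≠ [] := by simp
      simp only [List.cons_append, PySem.Chars.join_cons_cons] at ih ⊢
      rw [ih this]
      simp [List.append_assoc]

theorem sjoin_append_singleton (l : List String) (w : String) (h : l ≠ []) :
    sjoin (l ++ [w]) = sjoin l ++ " " ++ w := by
  apply string_toList_inj
  have hl : (l.map String.toList) ≠ [] := by simpa using h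
  simp [sjoin, PySem.Str.toList_join, String.toList_append,
    chars_join_append_singleton _ _ _ hl]

-- B's body over an explicit word list (slices rewritten to drop/take)
def bCore (ws : List String) : List String :=
  (List.range ws.length).flatMap (fun j =>
    ws.getD j "" :: (List.range j).map (fun i => sjoin ((ws.drop i).take (j + 1 - i))))

-- A's outer fold step
def aStep (st : List String × List String) (word : String) : List String × List String :=
  let out := st.2 ++ [word]
  let inner := st.1.foldl
    (fun (acc : List String × List String) p =>
      let p' := p ++ " " ++ word
      (acc.1 ++ [p'], acc.2 ++ [p'])) ([], out)
  (inner.1 ++ [word], inner.2)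

theorem generate_phrases_eq_aStep (sentence : String) :
    generate_phrases sentence = ((PySem.Str.split₀ sentence).foldl aStep ([], [])).2 := rfl

-- the inner enumerate loop is a map, yielded in order
theorem inner_foldl (F : List String) (w : String) (acc out : List String) :
    (F.foldl (fun (acc : List String × List String) p =>
        (acc.1 ++ [p ++ " " ++ w], acc.2 ++ [p ++ " " ++ w])) (acc, out))
      = (acc ++ F.map (fun p => p ++ " " ++ w), out ++ F.map (fun p => p ++ " " ++ w)) := by
  induction F generalizing acc out with
  | nil => simp
  | cons p t ih => simp [List.foldl_cons, ih, List.append_assoc]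

theorem bCore_snoc (ws : List String) (w : String) :
    bCore (ws ++ [w])
      = bCore ws ++ [w]
        ++ (List.range ws.length).map (fun i => sjoin (ws.drop i) ++ " " ++ w) := by
  simp only [bCore, List.length_append, List.length_singleton, List.range_succ,
    List.flatMap_append, List.append_assoc]
  congr 1
  · apply List.flatMap_congr
    intro j hj
    rw [List.mem_range] at hj
    congr 1
    · rw [List.getD_append _ _ _ _ hj]
    · apply List.map_congr_left
      intro i hi
      rw [List.mem_range] at hi
      rw [List.drop_append_of_le_length (by omega),
        List.take_append_of_le_length (by simp; omega)]
  · simp only [List.flatMap_cons, List.flatMap_nil, List.append_nil]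
    congr 1
    · simp [List.getD]
    · apply List.map_congr_left
      intro i hi
      rw [List.mem_range] at hi
      rw [List.drop_append_of_le_length (le_of_lt hi),
        List.take_of_length_le (by simp; omega),
        sjoin_append_singleton _ _ (by simp [List.drop_eq_nil_iff]; omega)]

-- the loop invariant: after processing ws, the frontier holds the suffix joins and
-- the output is exactly B's output on ws
theorem aFold_invariant (ws : List String) :
    ws.foldl aStep ([], [])
      = ((List.range ws.length).map (fun i => sjoin (ws.drop i)), bCore ws) := by
  induction ws using List.reverseRecOn with
  | nil => simp [bCore]
  | append_singleton ws w ih =>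
    rw [List.foldl_append, ih, List.foldl_cons, List.foldl_nil]
    have hmap : ∀ i ∈ List.range ws.length,
        sjoin (ws.drop i) ++ " " ++ w = sjoin ((ws ++ [w]).drop i) := by
      intro i hi
      rw [List.mem_range] at hi
      rw [List.drop_append_of_le_length (le_of_lt hi),
        sjoin_append_singleton _ _ (by simp [List.drop_eq_nil_iff]; omega)]
    refine Prod.ext_iff.mpr ⟨?_, ?_⟩
    case _ =>
      -- frontier component
      show (aStep ((List.range ws.length).map (fun i => sjoin (ws.drop i)), bCore ws) w).1
          = (List.range (ws ++ [w]).length).map (fun i => sjoin ((ws ++ [w]).drop i))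
      simp only [aStep, inner_foldl, List.nil_append, List.map_map]
      rw [List.length_append, List.length_singleton, List.range_succ, List.map_append]
      congr 1
      · exact List.map_congr_left (by intro i hi; exact hmap i hi)
      · simp [sjoin_singleton]
    case _ =>
      -- output component
      show (aStep ((List.range ws.length).map (fun i => sjoin (ws.drop i)), bCore ws) w).2
          = bCore (ws ++ [w])
      simp only [aStep, inner_foldl, List.map_map]
      rw [bCore_snoc, List.append_assoc]
      simp [Function.comp]

theorem slice_nat_succ (ws : List String) (i j : Nat) :
    PySem.List.slice ws (some (i : Int)) (some ((j : Int) + 1)) = (ws.drop i).take (j + 1 - i) := by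
  have h : ((j : Int) + 1) = ((j + 1 : Nat) : Int) := by push_cast; ring
  rw [h, PySem.List.slice_natCast]

theorem generate_phrases_alt_eq_bCore (sentence : String) :
    generate_phrases_alt sentence = bCore (PySem.Str.split₀ sentence) := by
  simp only [generate_phrases_alt, bCore, slice_nat_succ, sjoin]

-- ===== VERDICT (by name: the statement is the Claim_ definition above) =====
theorem generate_phrases_spec : Claim_equal_generate_phrases := by
  intro sentence _
  show generate_phrases sentence = generate_phrases_alt sentence
  rw [generate_phrases_eq_aStep, aFold_invariant, generate_phrases_alt_eq_bCore]
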